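/- GENERATED by tools/from_farm_form.py from prooffarm-gif/accepted/DGifGetExtension.2/Lemmas.lean (a worked proof of the farm's unit `DGifGetExtension.2`,
   accepted by the verdict) — do not edit. -/
import Gif.Spec.Units.DGifGetExtension_2
import Gif.Spec.AllSegs

/-!
  Lemmas for the unit `DGifGetExtension.2` (a BODY segment of a protected function: a checked store through the caller's
  out-pointer `ExtCode`, then the call of `DGifGetExtensionNext` with the caller's out-pointer `Extension`): the segment is walked
  in TWO STEPS that meet at the call's return address 0x109b62 (`ret7`), with a private assertion there.

      ge2_store_out    a store into an out-pointer's range keeps `HeapInv` ∧ `GifOK` ∧ `rem` (the third kind of store step, next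
                       to `store_stack` and `store_gif` of Gif/Spec/FrameCarry.lean §5)
      ge2_AtRet7       the assertion at `ret7`: `Body` + the result in `rax` + the post in terms of `rax`
      ge2_seg_call     0x109b45 … the check, the store of `*ExtCode`, the call of DGifGetExtensionNext … 0x109b62
      ge2_seg_tail     0x109b62 … 0x109afb: `mov r12d, eax ; jmp`: `ge2_AtRet7` → `Done`
-/

open X86 X86.User Asan ProgX.Base ProgX.Base.Spec Gif.Spec

set_option maxRecDepth 4000
set_option maxHeartbeats 4000000

namespace Gif.Spec.DGifGetExtension_2

/-- **A store into the range of an out-pointer** (`*ExtCode`: a stack object of a caller, loose for the shape, below 800000H)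
keeps the heap's invariant, the state invariant and the reader's measure. `hcur` is `⟨hc.1, hc.2.1⟩` of `Ctx.cursor_range`. -/
theorem ge2_store_out {H : Heap} {rest : List Obj} {frames frames' : List (Nat × FrameLayout)} {F : Forest} {R : Rd} {top : Nat}
    {mem : Mem} (hinv : HeapInv H rest frames top mem) (hok : GifOK H F R mem)
    (hcur : 0x700000 ≤ R.cur ∧ R.cur + 16 ≤ 0x800000) (hbase : H.base = 0x800000) (a : Word) (k val : Nat)
    (hout : OutPtr H rest frames' F R a.toNat k) :
    HeapInv H rest frames top (mem.writeLE a k val) ∧ GifOK H F R (mem.writeLE a k val) ∧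
      rem R (mem.writeLE a k val) = rem R mem := by
  have hlow := hout.low
  have hs : Mem.SameExcept [⟨a.toNat, a.toNat + k⟩] mem (mem.writeLE a k val) :=
    Mem.SameExcept.writeLE _ mem a k val (by omega) ⟨_, List.mem_cons_self, Nat.le_refl _, Nat.le_refl _⟩
  have hl : ∀ w, w ∈ [(⟨a.toNat, a.toNat + k⟩ : Span)] → Loose H F R w := by
    intro w hw
    have e := List.mem_singleton.mp hw
    rw [e]
    exact hout.buf.loose
  refine ⟨hinv.writeLE_out a k val (by omega) ?_ (by omega), ?_, ?_⟩
  · left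
    rw [hbase]
    exact hlow
  · exact hok.sameExcept hinv.heap hcur hs hl
  · exact rem_loose hs hl hinv.heap (hok.owns.placed hinv.heap) hcur

/-- **The three stores of segment 2 before the call of `DGifGetExtensionNext`** — the return address of the check call (stack), `*ExtCode`
(the caller's out-pointer), the return address of the call (stack) — keep the heap's invariant, the state invariant and the reader's
measure. The memory is given by an equation (`w_mem` of the walk): the nest of stores is never typed. -/
theorem ge2_three_stores {H : Heap} {rest : List Obj} {frames frames' : List (Nat × FrameLayout)} {F : Forest} {R : Rd} {top : Nat}
    {mem mem' : Mem} (hinv : HeapInv H rest frames top mem) (hok : GifOK H F R mem)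
    (hcur : 0x700000 ≤ R.cur ∧ R.cur + 16 ≤ 0x800000) (hbase : H.base = 0x800000) {a1 a2 a3 : Word} {x1 x2 x3 : Nat}
    (hout : OutPtr H rest frames' F R a2.toNat 4)
    (hm : mem' = ((mem.writeLE a1 8 x1).writeLE a2 4 x2).writeLE a3 8 x3)
    (h1 : 0x700000 ≤ a1.toNat) (h2 : a1.toNat + 8 ≤ R.cur) (h3 : 0x700000 ≤ a3.toNat) (h4 : a3.toNat + 8 ≤ R.cur) :
    HeapInv H rest frames top mem' ∧ GifOK H F R mem' ∧ rem R mem' = rem R mem := by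
  obtain ⟨hinvA, hokA, hremA⟩ := store_stack hinv hok hcur a1 8 x1 h1 h2
  obtain ⟨hinvB, hokB, hremB⟩ := ge2_store_out hinvA hokA hcur hbase a2 4 x2 hout
  obtain ⟨hinvC, hokC, hremC⟩ := store_stack hinvB hokB hcur a3 8 x3 h3 h4
  rw [hm]
  exact ⟨hinvC, hokC, hremC.trans (hremB.trans hremA)⟩

/-- **`*ExtCode` through the footprint of `DGifGetExtensionNext`**: the four bytes at `c` (a stack address above the callee's stack
window, off `*Extension` and off the cursor) are not in `pv.Buf`, not `gif.Error` (heap addresses), not `*Extension`, not `c->cur`. -/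
theorem ge2_code_kept {m m' : Mem} {lo hi pv x gif cur c : Nat}
    (hs : Mem.SameExcept [⟨lo, hi⟩, ⟨pv + 88, pv + 344⟩, ⟨x, x + 8⟩, ⟨gif + 96, gif + 100⟩, ⟨cur, cur + 8⟩] m m')
    (h1 : hi ≤ c) (h2 : c + 4 ≤ 0x800000) (hpv : 0x800000 ≤ pv) (hgif : 0x800000 ≤ gif)
    (hx : c + 4 ≤ x ∨ x + 8 ≤ c) (hc : c + 4 ≤ cur ∨ cur + 16 ≤ c) : rd m' c 4 = rd m c 4 := by
  apply hs.rd c 4 (by omega)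
  intro w hw
  simp only [List.mem_cons, List.mem_nil_iff, or_false] at hw
  rcases hw with rfl | rfl | rfl | rfl | rfl
  · right
    exact h1
  · left
    show c + 4 ≤ pv + 88
    omega
  · show c + 4 ≤ x ∨ x + 8 ≤ c
    exact hx
  · left
    show c + 4 ≤ gif + 96
    omega
  · show c + 4 ≤ cur ∨ cur + 8 ≤ c
    omega

/-- **A zero-extended byte, stored as 4 bytes and read back, is at most 255** (`movzx r12d, BYTE PTR [rsp + 20H]` … `mov [r13], r12d`). -/
theorem ge2_byte_le (x : BitVec 8) : (BitVec.zeroExtend 32 x).toNat % 256 ^ 4 ≤ 255 := by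
  have hx := x.isLt
  simp only [BitVec.zeroExtend, BitVec.toNat_setWidth]
  have h1 : x.toNat % 2 ^ 32 ≤ 255 := by omega
  omega

/-- **At 109B62H (ret7), `DGifGetExtensionNext(gif, Extension)` has returned**: `Body`, the result in `rax` (GIF_OK or GIF_ERROR), and
the contract's post-clause in terms of `rax`: `*ExtCode` is a byte, two bytes (or `2 + n`) consumed since the entry. -/
structure ge2_AtRet7 (H : Heap) (rest : List Obj) (frames : List (Nat × FrameLayout)) (F : Forest) (R : Rd) (u₀ e : State)
    (ret : Word) (v : State) : Prop where
  body : DGifGetExtension.Body Gif.L.DGifGetExtension.ret7 H rest frames F R u₀ e ret v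
  res : (v.reg .rax).toNat = 1 ∨ (v.reg .rax).toNat = 0
  ok1 : (v.reg .rax).toNat = 1 →
    rd v.mem (e.reg .rsi).toNat 4 ≤ 255 ∧
    ((rd v.mem (e.reg .rdx).toNat 8 = 0 ∧ rem R v.mem + 2 = rem R e.mem) ∨
     (rd v.mem (e.reg .rdx).toNat 8 = F.pv + 88 ∧ 1 ≤ rd v.mem (F.pv + 88) 1 ∧ rd v.mem (F.pv + 88) 1 ≤ 255 ∧
       rem R v.mem + 2 + rd v.mem (F.pv + 88) 1 = rem R e.mem))

/-- **109B45H … the call of DGifGetExtensionNext … 109B62H (ret7)** (dgif_lib.c:586 `*ExtCode = Buf`, l.590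
`DGifGetExtensionNext(GifFile, Extension)`). -/
theorem ge2_seg_call (Lay : Layout) (hLay : Lay.hi = 0x1000000) (μ : Microarch) (hμ : UserX.MicroOK μ) (u₀ : State)
    (hcode : HasCodeNat Lay u₀ Gif.L.DGifGetExtension.entry Gif.Code.code_DGifGetExtension.nat Gif.L.DGifGetExtension.size)
    (H : Heap) (rest : List Obj) (frames : List (Nat × FrameLayout)) (F : Forest) (R : Rd) (e : State) (ret : Word)
    (h_DGifGetExtensionNext : Calls Lay μ ProgX.Base.WayInv (ProgX.Base.conv u₀) Gif.L.DGifGetExtensionNext.entry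
      (Gif.Spec.DGifGetExtensionNext.spec H rest (DGifGetExtension.framesIn frames e) F R))
    (h_asan_store4_noabort : Asan.SmallCheck Lay μ ProgX.Base.WayInv (ProgX.Base.CodeOK u₀) [.rax, .rcx, .rdx] 4
      ProgX.Base.L.__asan_store4_noabort.entry)
    (v : State) (hat : DGifGetExtension.AfterRead H rest frames F R u₀ e ret v) :
    ReachVia Lay μ ProgX.Base.WayInv v (ge2_AtRet7 H rest frames F R u₀ e ret) := by
  -- THE PRELUDE: the entry assertion `AfterRead` = `Body` + the reader advanced by one byte
  obtain ⟨hbody, hrem_eq⟩ := hat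
  have he := hbody.entry
  v_entry he
  obtain ⟨henv, hrdi, hcodeP, hextP, hdisj⟩ := hbody.pre
  have hca := hbody.code_above
  have hea := hbody.ext_above
  have hclow := hcodeP.low
  have helow := hextP.low
  -- what the walker reads of a segment's entry state
  have w_rip := hbody.rip
  have c_rsp : v.reg .rsp = e.reg .rsp - 104 := hbody.rsp
  have c_rbx : v.reg .rbx = e.reg .rdi := hbody.rbx
  have c_r13 : v.reg .r13 = e.reg .rsi := hbody.r13
  have c_r14 : v.reg .r14 = e.reg .rdx := hbody.r14
  have w_kept : RegsKept [.rsp] v v := RegsKept.refl _ _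
  have w_eq : Mem.EqOn ProgX.Base.L.textLo ProgX.Base.L.textHi u₀.mem v.mem := ProgX.Base.conv_code_eqOn hbody.code
  have hdf := (show abiInv _ from hbody.abi).1
  have hmx := (show abiInv _ from hbody.abi).2
  have hsse := ProgX.Base.sseOK_of_abiInv hbody.abi
  -- the slots and the footprint that `Body` at the exit states again
  have k_r14 : v.mem.readLE (e.reg .rsp - 8) 8 = (e.reg .r14).toNat := hbody.slot_r14
  have k_r13 : v.mem.readLE (e.reg .rsp - 16) 8 = (e.reg .r13).toNat := hbody.slot_r13
  have k_r12 : v.mem.readLE (e.reg .rsp - 24) 8 = (e.reg .r12).toNat := hbody.slot_r12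
  have k_rbp : v.mem.readLE (e.reg .rsp - 32) 8 = (e.reg .rbp).toNat := hbody.slot_rbp
  have k_rbx : v.mem.readLE (e.reg .rsp - 40) 8 = (e.reg .rbx).toNat := hbody.slot_rbx
  have k_ra : UInt64.ofNat (v.mem.readLE (e.reg .rsp) 8) = ret := hbody.slot_ra
  have hsame : Mem.SameExcept
    [⟨(e.reg .rsp).toNat - 432, (e.reg .rsp).toNat⟩,
     shadowSpan ((e.reg .rsp).toNat - 104) ((e.reg .rsp).toNat - 40),
     ⟨F.pv + 88, F.pv + 344⟩,
     ⟨(e.reg .rsi).toNat, (e.reg .rsi).toNat + 4⟩,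
     ⟨(e.reg .rdx).toNat, (e.reg .rdx).toNat + 8⟩,
     ⟨F.gif + 96, F.gif + 100⟩,
     ⟨R.cur, R.cur + 8⟩] e.mem v.mem := hbody.same
  -- where the cursor, gif and pv are, as numbers
  have hcur := henv.ctx.cursor_range henv.heap.inv.shadow
  have hbase := henv.heap.base
  have hgin := henv.ok.owns.inside henv.heap.inv.heap (o := (F.gif, 120)) List.mem_cons_self
  simp only at hgin
  rw [hbase] at hgin
  obtain ⟨hg1, -, -, -, hg2⟩ := hgin
  -- THE WALK, to the call's return address
  u_walk hcode [hμ.vendor] until [Gif.L.DGifGetExtension.ret7] span [ProgX.Base.L.textLo, ProgX.Base.L.textHi] side (v_side)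
  case check_109b4e =>
    -- dgif_lib.c:586 the store of `*ExtCode`: 4 bytes inside the caller's live object (the pre's `OutPtr`, one more frame)
    have hun : ShadowUntouched v.mem s_109b4e.mem := by v_untouched
    have hcl : LiveIn (H.liveObjs ++ rest) (DGifGetExtension.framesIn frames e) (e.reg .rsi).toNat 4 :=
      hcodeP.buf.live.push_frame _
    exact hcl.accSmall hbody.inv.shadow hun _ 4 (by decide) (by u_omega) (by u_omega)
  case call_inv =>
    v_inv
  case pre_109b5d =>
    -- DGIFGETEXTENSIONNEXT'S PRECONDITION. The three stores since `v`: two return addresses (stack), `*ExtCode`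
    obtain ⟨hinvC, hokC, hremC⟩ := ge2_three_stores hbody.inv hbody.ok ⟨hcur.1, hcur.2.1⟩ hbase hcodeP w_mem
      (by u_omega) (by u_omega) (by u_omega) (by u_omega)
    -- the environment for the frame list with the own frame in front: nothing else was written
    have hs : Mem.SameExcept [⟨(e.reg .rsp).toNat - 432, (e.reg .rsp).toNat - 104⟩] s_109b5d.mem s_109b5d.mem :=
      Mem.SameExcept.refl _ _
    have henv' : Env H rest (DGifGetExtension.framesIn frames e) F R s_109b5d := by
      refine henv.at_call hinvC hokC hs (by omega) (by omega) ?_ ?_ ?_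
      · rw [w_rsp]
        u_omega
      · rw [w_rsp]
        u_omega
      · rw [w_rsp]
        u_omega
    -- the three clauses: `Env`, `rdi = gif`, `Extension` is the caller's out-pointer (one more frame)
    refine ⟨henv', ?_, ?_⟩
    · rw [w_rdi]
      exact hrdi
    · rw [w_rsi]
      exact hextP.push _
  -- 0x109b62 (ret7): DGIFGETEXTENSIONNEXT HAS RETURNED
  obtain ⟨hback, hbool, hblock⟩ := w_post
  -- the three stores before the call kept the reader where it was
  obtain ⟨-, -, hrem0⟩ := ge2_three_stores hbody.inv hbody.ok ⟨hcur.1, hcur.2.1⟩ hbase hcodeP w_mem_109b5d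
    (by u_omega) (by u_omega) (by u_omega) (by u_omega)
  have e_top : (s_109b5d.reg .rsp).toNat + 8 = (e.reg .rsp).toNat - 104 := by
    rw [w_rsp_109b5d]
    u_omega
  have e_rsi : (s_109b5d.reg .rsi).toNat = (e.reg .rdx).toNat := by rw [w_rsi_109b5d]
  -- where gif and pv are, as numbers
  obtain ⟨hp1, hp2, -⟩ := henv.ok.pv_where henv.heap.inv.heap hbase
  -- `*ExtCode` at the callee's entry is the byte just stored …
  have hcode0 : rd s_109b5d.mem (e.reg .rsi).toNat 4 ≤ 255 := by
    rw [w_mem_109b5d]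
    rw [rd_writeLE_disjoint _ _ _ _ _ _ (by u_omega) (by omega) (by u_omega)]
    rw [rd_writeLE_same _ (e.reg .rsi) 4 _ _ rfl (by decide)]
    exact ge2_byte_le _
  -- … and the callee's footprint misses it (`OutPtr.low`, the disjointness clause of the pre, a loose window misses the cursor)
  have w_same0 := w_same
  simp only [X86.User.Spec.footprint, vspec, w_rsp_109b5d, w_rsi_109b5d] at w_same0
  have hoffc := hcodeP.buf.loose.off_cursor henv.heap.inv.heap (henv.ok.owns.placed henv.heap.inv.heap) ⟨hcur.1, hcur.2.1⟩
  simp only at hoffc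
  have hcode1 : rd s_109b5dr.mem (e.reg .rsi).toNat 4 ≤ 255 := by
    rw [ge2_code_kept w_same0 (by u_omega) hclow (by omega) (by omega) hdisj hoffc]
    exact hcode0
  clear w_same0 hoffc hdisj hcode0
  -- the callee's footprint in terms of `v` (`w_same : SameExcept […] v.mem s_109b5dr.mem`)
  v_after_call w_rsp_109b5d w_mem_109b5d
  simp only [w_rsi_109b5d] at w_same
  -- THE SLOTS AND THE RETURN ADDRESS, over the three stores (first step) and through the callee's footprint (second step)
  have hp14 : s_109b5d.mem.readLE (e.reg .rsp - 8) 8 = (e.reg .r14).toNat := by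
    rw [w_mem_109b5d]
    u_frame k_r14
  rw [w_mem_109b5d] at hp14
  have hs14 : s_109b5dr.mem.readLE (e.reg .rsp - 8) 8 = (e.reg .r14).toNat := by u_frame hp14
  have hp13 : s_109b5d.mem.readLE (e.reg .rsp - 16) 8 = (e.reg .r13).toNat := by
    rw [w_mem_109b5d]
    u_frame k_r13
  rw [w_mem_109b5d] at hp13
  have hs13 : s_109b5dr.mem.readLE (e.reg .rsp - 16) 8 = (e.reg .r13).toNat := by u_frame hp13
  have hp12 : s_109b5d.mem.readLE (e.reg .rsp - 24) 8 = (e.reg .r12).toNat := by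
    rw [w_mem_109b5d]
    u_frame k_r12
  rw [w_mem_109b5d] at hp12
  have hs12 : s_109b5dr.mem.readLE (e.reg .rsp - 24) 8 = (e.reg .r12).toNat := by u_frame hp12
  have hpbp : s_109b5d.mem.readLE (e.reg .rsp - 32) 8 = (e.reg .rbp).toNat := by
    rw [w_mem_109b5d]
    u_frame k_rbp
  rw [w_mem_109b5d] at hpbp
  have hsbp : s_109b5dr.mem.readLE (e.reg .rsp - 32) 8 = (e.reg .rbp).toNat := by u_frame hpbp
  have hpbx : s_109b5d.mem.readLE (e.reg .rsp - 40) 8 = (e.reg .rbx).toNat := by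
    rw [w_mem_109b5d]
    u_frame k_rbx
  rw [w_mem_109b5d] at hpbx
  have hsbx : s_109b5dr.mem.readLE (e.reg .rsp - 40) 8 = (e.reg .rbx).toNat := by u_frame hpbx
  have hpra : UInt64.ofNat (s_109b5d.mem.readLE (e.reg .rsp) 8) = ret := by
    rw [w_mem_109b5d]
    u_frame k_ra
  rw [w_mem_109b5d] at hpra
  have hsra : UInt64.ofNat (s_109b5dr.mem.readLE (e.reg .rsp) 8) = ret := by u_frame hpra
  -- the footprint since the entry: the callee's windows lie inside the function's
  have hsame1 : Mem.SameExcept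
    [⟨(e.reg .rsp).toNat - 432, (e.reg .rsp).toNat⟩,
     shadowSpan ((e.reg .rsp).toNat - 104) ((e.reg .rsp).toNat - 40),
     ⟨F.pv + 88, F.pv + 344⟩,
     ⟨(e.reg .rsi).toNat, (e.reg .rsi).toNat + 4⟩,
     ⟨(e.reg .rdx).toNat, (e.reg .rdx).toNat + 8⟩,
     ⟨F.gif + 96, F.gif + 100⟩,
     ⟨R.cur, R.cur + 8⟩] e.mem s_109b5dr.mem := by u_same
  -- the heap's invariant comes back with the clean stack at the callee's `rsp + 8` = the body's `rsp`
  have hinv1 : HeapInv H rest (DGifGetExtension.framesIn frames e) ((e.reg .rsp).toNat - 104) s_109b5dr.mem := by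
    rw [← e_top]
    exact hback.inv
  -- THE EXIT ASSERTION: `Body` at `ret7` …
  have hbody1 : DGifGetExtension.Body Gif.L.DGifGetExtension.ret7 H rest frames F R u₀ e ret s_109b5dr := {
    entry := hbody.entry
    pre := hbody.pre
    code_above := hca
    ext_above := hea
    rip := w_rip
    rsp := w_rsp
    rbx := (w_kept.get .rbx rfl).trans hbody.rbx
    r13 := (w_kept.get .r13 rfl).trans hbody.r13
    r14 := (w_kept.get .r14 rfl).trans hbody.r14
    rbp := (w_kept.get .rbp rfl).trans hbody.rbp
    r15 := (w_kept.get .r15 rfl).trans hbody.r15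
    slot_r14 := hs14
    slot_r13 := hs13
    slot_r12 := hs12
    slot_rbp := hsbp
    slot_rbx := hsbx
    slot_ra := hsra
    inv := hinv1
    ok := hback.ok
    rem := by
      have h1 := hback.rem
      rw [hrem0] at h1
      omega
    same := hsame1
    code := w_code
    abi := w_inv
  }
  -- … the result and the post-clause: `BlockPost` counted from a reader that had advanced by one byte
  refine ReachVia.done ?_
  exact {
    body := hbody1
    res := hbool
    ok1 := by
      intro h1
      have hb := hblock h1
      rw [e_rsi] at hb
      unfold BlockPost at hb
      rw [hrem0] at hb
      refine ⟨hcode1, ?_⟩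
      rcases hb with ⟨hb1, hb2⟩ | ⟨hb1, hb2, hb3, hb4⟩
      · left
        exact ⟨hb1, by omega⟩
      · right
        exact ⟨hb1, hb2, hb3, by omega⟩
  }

/-- **109B62H (ret7) … 109AFBH** (dgif_lib.c:590 `return DGifGetExtensionNext(…)`): `mov r12d, eax ; jmp 109afb`: the result goes to
`r12` (zero-extended), nothing is stored. -/
theorem ge2_seg_tail (Lay : Layout) (hLay : Lay.hi = 0x1000000) (μ : Microarch) (hμ : UserX.MicroOK μ) (u₀ : State)
    (hcode : HasCodeNat Lay u₀ Gif.L.DGifGetExtension.entry Gif.Code.code_DGifGetExtension.nat Gif.L.DGifGetExtension.size)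
    (H : Heap) (rest : List Obj) (frames : List (Nat × FrameLayout)) (F : Forest) (R : Rd) (e : State) (ret : Word)
    (v : State) (hat : ge2_AtRet7 H rest frames F R u₀ e ret v) :
    ReachVia Lay μ ProgX.Base.WayInv v (DGifGetExtension.Done H rest frames F R u₀ e ret) := by
  -- THE PRELUDE: the entry assertion, as in `ge2_seg_call`
  obtain ⟨hbody, hres, hok1⟩ := hat
  have he := hbody.entry
  v_entry he
  have w_rip := hbody.rip
  have c_rsp : v.reg .rsp = e.reg .rsp - 104 := hbody.rsp
  -- `rax` as a variable `z`
  obtain ⟨z, c_rax⟩ : ∃ z, v.reg .rax = z := ⟨_, rfl⟩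
  rw [c_rax] at hres hok1
  have w_kept : RegsKept [.rsp] v v := RegsKept.refl _ _
  have w_eq : Mem.EqOn ProgX.Base.L.textLo ProgX.Base.L.textHi u₀.mem v.mem := ProgX.Base.conv_code_eqOn hbody.code
  have hdf := (show abiInv _ from hbody.abi).1
  have hmx := (show abiInv _ from hbody.abi).2
  have hsse := ProgX.Base.sseOK_of_abiInv hbody.abi
  -- THE WALK, two instructions, to the epilogue's first instruction
  u_walk hcode [hμ.vendor] until [Gif.L.DGifGetExtension.at_109afb] span [ProgX.Base.L.textLo, ProgX.Base.L.textHi] side (v_side)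
  -- 0x109afb: the result is in `r12`, zero-extended: 1 or 0 as in `rax`
  have hr12 : (s_109b65.reg .r12).toNat = z.toNat := by
    rw [w_r12, toNat_ofBV32, toNat_part32]
    omega
  -- THE EXIT ASSERTION: `Body` at 0x109afb (nothing was stored) …
  have hbody1 : DGifGetExtension.Body Gif.L.DGifGetExtension.at_109afb H rest frames F R u₀ e ret s_109b65 := {
    entry := hbody.entry
    pre := hbody.pre
    code_above := hbody.code_above
    ext_above := hbody.ext_above
    rip := w_rip
    rsp := w_rsp
    rbx := (w_kept.get .rbx rfl).trans hbody.rbx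
    r13 := (w_kept.get .r13 rfl).trans hbody.r13
    r14 := (w_kept.get .r14 rfl).trans hbody.r14
    rbp := (w_kept.get .rbp rfl).trans hbody.rbp
    r15 := (w_kept.get .r15 rfl).trans hbody.r15
    slot_r14 := by
      rw [w_mem]
      exact hbody.slot_r14
    slot_r13 := by
      rw [w_mem]
      exact hbody.slot_r13
    slot_r12 := by
      rw [w_mem]
      exact hbody.slot_r12
    slot_rbp := by
      rw [w_mem]
      exact hbody.slot_rbp
    slot_rbx := by
      rw [w_mem]
      exact hbody.slot_rbx
    slot_ra := by
      rw [w_mem]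
      exact hbody.slot_ra
    inv := by
      rw [w_mem]
      exact hbody.inv
    ok := by
      rw [w_mem]
      exact hbody.ok
    rem := by
      rw [w_mem]
      exact hbody.rem
    same := by
      rw [w_mem]
      exact hbody.same
    code := ProgX.Base.conv_code_in w_eq
    abi := by
      refine ProgX.Base.abiInv_of ?_ ?_
      · rw [w_flags]
        exact hdf
      · rw [w_mxcsr]
        exact hmx
  }
  -- … and the results
  refine ReachVia.done ?_
  exact {
    body := hbody1
    res := by
      rw [hr12]
      exact hres
    ok1 := by
      intro h1
      rw [hr12] at h1
      rw [w_mem]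
      exact hok1 h1
  }

end Gif.Spec.DGifGetExtension_2
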